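-- pv_equiv track=rewrite | github.com/Eric-Kadyrov/PYTHON | password_gen.py | build_charset
-- ===== SOURCE A (Python) =====
-- import string
-- from typing import Dict, Tuple
--
-- LOWER = string.ascii_lowercase
--
-- UPPER = string.ascii_uppercase
--
-- DIGITS = string.digits
--
-- SPECIAL = "!@#$%^&*"
--
-- AMBIGUOUS = set("0Ool1I|`'\"{}[]()/\\;:,.<>~")
--
-- def build_charset(include_lower: bool, include_upper: bool, include_digits: bool,
--                   include_special: bool, exclude_ambiguous: bool) -> Dict[str, str]:
--     pools = {}
--     if include_lower:
--         pools["lower"] = LOWER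
--     if include_upper:
--         pools["upper"] = UPPER
--     if include_digits:
--         pools["digits"] = DIGITS
--     if include_special:
--         pools["special"] = SPECIAL
--
--     if exclude_ambiguous:
--         def filt(s: str) -> str:
--             return "".join(c for c in s if c not in AMBIGUOUS)
--         pools = {k: filt(v) for k, v in pools.items()}
--
--         # Safety: if filtering removed an entire pool, drop it
--         pools = {k: v for k, v in pools.items() if v}
--
--     return pools
-- ===== SOURCE B (Python) =====
-- import string
--
-- LOWER = string.ascii_lowercase
-- UPPER = string.ascii_uppercase
-- DIGITS = string.digits
-- SPECIAL = "!@#$%^&*"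
-- AMBIGUOUS = set("0Ool1I|`'\"{}[]()/\\;:,.<>~")
--
--
-- def build_charset(include_lower: bool, include_upper: bool, include_digits: bool,
--                   include_special: bool, exclude_ambiguous: bool):
--     # Character-driven: walk the whole alphabet once, classify each character
--     # into its pool name, and append it to that pool if the pool is wanted and
--     # the character survives the ambiguity filter. Pools that end up empty are
--     # never created at all.
--     wanted = {"lower": include_lower, "upper": include_upper,
--               "digits": include_digits, "special": include_special}
--
--     def classify(c: str) -> str:
--         if c.islower():
--             return "lower"
--         if c.isupper():
--             return "upper"
--         if c.isdigit():
--             return "digits"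
--         return "special"
--
--     pools = {}
--     for c in LOWER + UPPER + DIGITS + SPECIAL:
--         k = classify(c)
--         if wanted[k] and not (exclude_ambiguous and c in AMBIGUOUS):
--             pools[k] = pools.get(k, "") + c
--     return pools
-- ===== Notes on version B (the rewrite author's own statement) =====
-- stated objective: alternative
-- what changed: B is character-driven: instead of A's pool-driven guards plus filter and drop-empty passes, it walks the combined alphabet string once, classifies each character into its pool name, and appends surviving characters to a dict built incrementally (empty pools are never created).
import Mathlib
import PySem

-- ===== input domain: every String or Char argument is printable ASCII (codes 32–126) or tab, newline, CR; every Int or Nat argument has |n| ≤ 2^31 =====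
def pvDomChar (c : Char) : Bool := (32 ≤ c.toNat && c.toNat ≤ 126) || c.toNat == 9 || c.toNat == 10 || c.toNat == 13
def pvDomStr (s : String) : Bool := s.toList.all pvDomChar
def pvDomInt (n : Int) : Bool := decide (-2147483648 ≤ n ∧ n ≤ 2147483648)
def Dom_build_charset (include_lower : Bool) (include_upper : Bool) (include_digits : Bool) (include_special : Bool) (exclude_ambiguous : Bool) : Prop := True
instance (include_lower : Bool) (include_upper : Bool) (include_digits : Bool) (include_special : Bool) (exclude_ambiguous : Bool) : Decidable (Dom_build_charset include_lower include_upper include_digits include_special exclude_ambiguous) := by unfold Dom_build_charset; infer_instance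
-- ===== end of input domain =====

-- ===== PORT A =====
-- B walks the combined alphabet once and classifies each character into its pool (character-driven, one pass); same cost, different decomposition.
def pvLOWER : String := "abcdefghijklmnopqrstuvwxyz"
def pvUPPER : String := "ABCDEFGHIJKLMNOPQRSTUVWXYZ"
def pvDIGITS : String := "0123456789"
def pvSPECIAL : String := "!@#$%^&*"
def pvAMBIGUOUS : PySem.Set Char := PySem.Set.ofList "0Ool1I|`'\"{}[]()/\\;:,.<>~".toList

-- filt(s): "".join(c for c in s if c not in AMBIGUOUS)
def pvFilt (s : String) : String := String.ofList (s.toList.filter (fun c => !(pvAMBIGUOUS.contains c)))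

def build_charset (include_lower : Bool) (include_upper : Bool) (include_digits : Bool) (include_special : Bool) (exclude_ambiguous : Bool) : List (String × String) :=
  let pools : List (String × String) := []
  let pools := if include_lower then pools ++ [("lower", pvLOWER)] else pools
  let pools := if include_upper then pools ++ [("upper", pvUPPER)] else pools
  let pools := if include_digits then pools ++ [("digits", pvDIGITS)] else pools
  let pools := if include_special then pools ++ [("special", pvSPECIAL)] else pools
  if exclude_ambiguous then
    let pools := pools.map (fun kv => (kv.1, pvFilt kv.2))
    pools.filter (fun kv => kv.2 != "")
  else pools

-- ===== PORT B =====
-- classify(c): exact for the characters of the alphabet (ASCII letters/digits/punctuation)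
def pvClassify (c : Char) : String :=
  if 'a' ≤ c && c ≤ 'z' then "lower"
  else if 'A' ≤ c && c ≤ 'Z' then "upper"
  else if '0' ≤ c && c ≤ '9' then "digits"
  else "special"

-- pools[k] = pools.get(k, "") + c  (first-match assoc update, append key if absent)
def pvAppendChar : List (String × String) → String → Char → List (String × String)
  | [], k, c => [(k, String.ofList [c])]
  | (k', v) :: rest, k, c =>
      if k' = k then (k', String.ofList (v.toList ++ [c])) :: rest
      else (k', v) :: pvAppendChar rest k c

def build_charset_alt (include_lower : Bool) (include_upper : Bool) (include_digits : Bool) (include_special : Bool) (exclude_ambiguous : Bool) : List (String × String) :=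
  let wanted : PySem.Dict String Bool := PySem.Dict.ofList
    [("lower", include_lower), ("upper", include_upper),
     ("digits", include_digits), ("special", include_special)]
  (pvLOWER ++ pvUPPER ++ pvDIGITS ++ pvSPECIAL).toList.foldl (fun pools c =>
    let k := pvClassify c
    if PySem.Dict.getD wanted k false && !(exclude_ambiguous && pvAMBIGUOUS.contains c) then
      pvAppendChar pools k c
    else pools) []

-- ===== PRECONDITION & SPEC =====
def Spec_build_charset (include_lower : Bool) (include_upper : Bool) (include_digits : Bool) (include_special : Bool) (exclude_ambiguous : Bool) (out : List (String × String)) : Prop := out = build_charset_alt include_lower include_upper include_digits include_special exclude_ambiguous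
instance (include_lower : Bool) (include_upper : Bool) (include_digits : Bool) (include_special : Bool) (exclude_ambiguous : Bool) (out : List (String × String)) : Decidable (Spec_build_charset include_lower include_upper include_digits include_special exclude_ambiguous out) := by unfold Spec_build_charset; infer_instance

-- ===== CLAIM (what is proved, stated in full; the proofs are below) =====
def Claim_equal_build_charset : Prop := ∀ (include_lower : Bool) (include_upper : Bool) (include_digits : Bool) (include_special : Bool) (exclude_ambiguous : Bool), Dom_build_charset include_lower include_upper include_digits include_special exclude_ambiguous → Spec_build_charset include_lower include_upper include_digits include_special exclude_ambiguous (build_charset include_lower include_upper include_digits include_special exclude_ambiguous)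

-- ===== LEMMAS AND PROOFS =====

-- ===== VERDICT (by name: the statement is the Claim_ definition above) =====
set_option maxRecDepth 4000 in
theorem build_charset_spec : Claim_equal_build_charset := by
  unfold Claim_equal_build_charset
  intro a b c d e _
  unfold Spec_build_charset
  revert a b c d e
  decide
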